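-- pv_equiv track=rewrite | github.com/codingbjs/AlgorythmExam | brute_force/brute_force_q.py | doom_day1
-- ===== SOURCE A (Python) =====
-- def doom_day1(n):
--     doom_list = []
--     doom_num = 666
--     i = 0
--     while True:
--         if i == doom_num:
--             doom_list.append(i)
--             doom_num += 1000
--             if len(doom_list) == n:
--                 return doom_list
--         i += 1
-- ===== SOURCE B (Python) =====
-- def doom_day1(n):
--     return [666 + 1000 * k for k in range(n)]
-- ===== Notes on version B (the rewrite author's own statement) =====
-- stated objective: faster
-- what changed: B computes each element directly as 666+1000*k over range(n) instead of stepping a counter i by 1 through ~1000n iterations.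
-- outside the precondition, e.g. on doom_day1(0): A does not finish within the time limit, B returns []
import Mathlib
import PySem

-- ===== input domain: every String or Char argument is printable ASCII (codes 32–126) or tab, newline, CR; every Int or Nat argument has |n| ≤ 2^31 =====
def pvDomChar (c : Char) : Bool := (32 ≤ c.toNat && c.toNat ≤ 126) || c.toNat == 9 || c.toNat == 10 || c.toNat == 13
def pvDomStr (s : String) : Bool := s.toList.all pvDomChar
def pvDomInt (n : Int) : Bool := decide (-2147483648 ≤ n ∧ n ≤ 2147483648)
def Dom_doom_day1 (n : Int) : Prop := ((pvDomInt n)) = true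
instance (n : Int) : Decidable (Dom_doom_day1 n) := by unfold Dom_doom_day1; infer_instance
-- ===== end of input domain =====

-- B replaces A's unit-stepping counter (≈1000·n iterations) with the direct formula 666+1000·k, O(n).

-- ===== PORT A =====
-- A's `while True` loop stepping i by 1; fuel makes it total (enough fuel for every n in Pre_),
-- the computation per iteration is exactly A's.
def doomLoopA (fuel : Nat) (doom_list : List Int) (doom_num : Int) (i : Int) (n : Int) : List Int :=
  match fuel with
  | 0 => doom_list
  | fuel + 1 =>
    if i = doom_num then
      let dl := doom_list ++ [i]
      let dn := doom_num + 1000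
      if (dl.length : Int) = n then dl
      else doomLoopA fuel dl dn (i + 1) n
    else doomLoopA fuel doom_list doom_num (i + 1) n

def doom_day1 (n : Int) : List Int :=
  doomLoopA (1000 * n.toNat + 1000) [] 666 0 n

-- ===== PORT B =====
def doom_day1_alt (n : Int) : List Int :=
  (PySem.List.pyRange 0 n 1).map (fun k => 666 + 1000 * k)

-- ===== PRECONDITION & SPEC =====
-- Pre_ excludes n ≤ 0, on which A's `while True` loop never returns (infinite loop).
def Pre_doom_day1 (n : Int) : Prop := 1 ≤ n
instance (n : Int) : Decidable (Pre_doom_day1 n) := by unfold Pre_doom_day1; infer_instance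
def pvWitness_doom_day1 : Int := (3)

def Spec_doom_day1 (n : Int) (out : List Int) : Prop := out = doom_day1_alt n
instance (n : Int) (out : List Int) : Decidable (Spec_doom_day1 n out) := by unfold Spec_doom_day1; infer_instance

-- ===== CLAIM (what is proved, stated in full; the proofs are below) =====
def Claim_equal_doom_day1 : Prop := ∀ (n : Int), Dom_doom_day1 n → Pre_doom_day1 n → Spec_doom_day1 n (doom_day1 n)

-- ===== LEMMAS AND PROOFS =====

-- unfolding equation for one fuel step
theorem doomLoopA_succ (f : Nat) (dl : List Int) (dn i n : Int) :
    doomLoopA (f + 1) dl dn i n =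
      if i = dn then
        (if ((dl ++ [i]).length : Int) = n then dl ++ [i]
         else doomLoopA f (dl ++ [i]) (dn + 1000) (i + 1) n)
      else doomLoopA f dl dn (i + 1) n := rfl

-- stepping i from dn - g up to dn consumes g fuel and changes nothing else
theorem doomLoopA_skip (g : Nat) (f : Nat) (dl : List Int) (dn n : Int) :
    doomLoopA (g + f) dl dn (dn - g) n = doomLoopA f dl dn dn n := by
  induction g generalizing f with
  | zero => simp
  | succ g ih =>
    have hne : dn - (((g : Nat) + 1 : Nat) : Int) ≠ dn := by push_cast; omega
    have hf : g + 1 + f = (g + f) + 1 := by omega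
    rw [hf, doomLoopA_succ, if_neg hne]
    have hi : dn - (((g : Nat) + 1 : Nat) : Int) + 1 = dn - (g : Nat) := by push_cast; ring
    rw [hi]
    exact ih f

-- main invariant: k appends remaining, i has just reached doom_num
theorem doomLoopA_main (k : Nat) (f : Nat) (dl : List Int) (dn n : Int)
    (hlen : (dl.length : Int) + k = n) (hk : 1 ≤ k) :
    doomLoopA (1000 * (k - 1) + 1 + f) dl dn dn n
      = dl ++ (List.range k).map (fun j : Nat => dn + 1000 * (j : Int)) := by
  induction k generalizing f dl dn with
  | zero => omega
  | succ k ih =>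
    have hsplit : (List.range (k + 1)).map (fun j : Nat => dn + 1000 * (j : Int))
        = dn :: (List.range k).map (fun j : Nat => (dn + 1000) + 1000 * (j : Int)) := by
      rw [List.range_succ_eq_map, List.map_cons, List.map_map]
      refine congrArg₂ _ (by ring_nf) ?_
      refine List.map_congr_left (fun a _ => ?_)
      simp only [Function.comp]
      push_cast
      ring
    by_cases hk0 : k = 0
    · subst hk0
      have hf : 1000 * (0 + 1 - 1) + 1 + f = f + 1 := by omega
      rw [hf, doomLoopA_succ, if_pos rfl]
      have hlen' : ((dl ++ [dn]).length : Int) = n := by simp; omega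
      rw [if_pos hlen', hsplit]
      simp
    · have hk1 : 1 ≤ k := Nat.one_le_iff_ne_zero.mpr hk0
      have hf : 1000 * (k + 1 - 1) + 1 + f = (1000 * k + f) + 1 := by omega
      rw [hf, doomLoopA_succ, if_pos rfl]
      have hne : ((dl ++ [dn]).length : Int) ≠ n := by simp; push_cast at hlen ⊢; omega
      rw [if_neg hne]
      have hfuel : 1000 * k + f = 999 + (1000 * (k - 1) + 1 + f) := by omega
      have hi : dn + 1 = (dn + 1000) - ((999 : Nat) : Int) := by push_cast; ring
      rw [hfuel, hi, doomLoopA_skip 999 (1000 * (k - 1) + 1 + f) (dl ++ [dn]) (dn + 1000) n]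
      rw [ih (f := f) (dl := dl ++ [dn]) (dn := dn + 1000) (by simp; push_cast at hlen ⊢; omega) hk1]
      rw [hsplit]
      simp

-- ===== VERDICT (by name: the statement is the Claim_ definition above) =====
theorem doom_day1_spec : Claim_equal_doom_day1 := by
  intro n _ hpre
  have hn : (1 : Int) ≤ n := hpre
  unfold Spec_doom_day1 doom_day1 doom_day1_alt
  have hk : 1 ≤ n.toNat := by omega
  have h0 : (0 : Int) = 666 - (666 : Nat) := by norm_num
  have hfuel : 1000 * n.toNat + 1000 = 666 + (1000 * (n.toNat - 1) + 1 + 1333) := by omega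
  rw [hfuel, h0, doomLoopA_skip 666 (1000 * (n.toNat - 1) + 1 + 1333) [] 666 n]
  rw [doomLoopA_main n.toNat 1333 [] 666 n (by simp; omega) hk]
  rw [PySem.List.pyRange_one]
  norm_num [List.map_map]
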